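-- pv_equiv track=rewrite | github.com/calam1/coursera | ucsd_algorithms/ucsd_course_1/week_5/paths_dp_101.py | find
-- ===== SOURCE A (Python) =====
-- d = {}
--
-- def find(x, y):
--     ''' find total number of paths from (0, 0) to whatever the inputted x and y is'''
--     if x == 0 and y == 0: # means you have arrived at endpoint
--         return 1
--     if x < y:
--         return 0
--     if  d.get((x, y)) is not None:
--         return d.get((x, y))
--     ret = 0
--     if x > 0:
--         ret += find(x-1, y)
--     if y > 0:
--         ret += find(x, y-1)
--     if x > 0 and y > 0:
--         ret += find(x-1, y-1)
--     d[(x, y)] = ret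
--
--     return ret
-- ===== SOURCE B (Python) =====
-- def find(x, y):
--     ''' find total number of paths from (0, 0) to whatever the inputted x and y is'''
--     if y < 0 or x < y:
--         return 0
--     # bottom-up DP, one row at a time: row[j] = number of paths to (i, j)
--     row = [1] + [0] * y
--     for i in range(1, x + 1):
--         new = [1]
--         for j in range(1, y + 1):
--             new.append(0 if j > i else new[j - 1] + row[j] + row[j - 1])
--         row = new
--     return row[y]
-- ===== Notes on version B (the rewrite author's own statement) =====
-- stated objective: alternative
-- what changed: Replaced the top-down memoized recursion (with its module-level cache dict) by a bottom-up iterative DP that fills the table one row at a time keeping only the previous row.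
-- outside the precondition, e.g. on find(9950, 0): A returns 1, B returns 1
import Mathlib
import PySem

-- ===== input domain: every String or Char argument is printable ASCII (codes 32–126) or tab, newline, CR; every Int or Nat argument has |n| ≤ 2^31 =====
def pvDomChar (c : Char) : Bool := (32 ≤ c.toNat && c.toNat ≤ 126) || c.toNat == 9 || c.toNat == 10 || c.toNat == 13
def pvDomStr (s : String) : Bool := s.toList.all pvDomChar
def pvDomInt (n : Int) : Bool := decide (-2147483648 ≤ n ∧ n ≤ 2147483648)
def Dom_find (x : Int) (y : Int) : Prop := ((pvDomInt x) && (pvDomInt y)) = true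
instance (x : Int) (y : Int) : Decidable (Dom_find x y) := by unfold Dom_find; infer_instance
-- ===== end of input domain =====

-- B replaces A's top-down memoized recursion by a bottom-up row-by-row DP (objective: alternative, same cost);
-- return values agree on all of Pre_.  (A also mutates a module-level memo dict; equivalence is about the return value only.)

-- ===== PORT A =====
-- A's recursion, with the global memo dict threaded through as state (fresh at each top-level call).
def findMemo (d : PySem.Dict (Int × Int) Int) (x : Int) (y : Int) : Int × PySem.Dict (Int × Int) Int :=
  if x = 0 ∧ y = 0 then (1, d)
  else if x < y then (0, d)
  else
    match d.get? (x, y) with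
    | some v => (v, d)
    | none =>
      -- ret = 0; ret += … in the same order as A
      let p1 := if h : 0 < x then findMemo d (x - 1) y else (0, d)
      let p2 := if h : 0 < y then findMemo p1.2 x (y - 1) else (0, p1.2)
      let p3 := if h : 0 < x ∧ 0 < y then findMemo p2.2 (x - 1) (y - 1) else (0, p2.2)
      (p1.1 + p2.1 + p3.1, p3.2.insert (x, y) (p1.1 + p2.1 + p3.1))
termination_by (x.toNat + y.toNat)
decreasing_by all_goals omega

def find (x : Int) (y : Int) : Int := (findMemo PySem.Dict.empty x y).1

-- ===== PORT B =====
-- inner loop of Source B: new = [1]; for j in range(1, y+1): new.append(…)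
-- (all list indices are in range, so getD 0 is exact there)
def newRowB (i : Nat) (yn : Nat) (row : List Int) : List Int :=
  (List.range yn).foldl
    (fun new j0 =>
      let j := j0 + 1
      new ++ [if i < j then 0 else new.getD (j - 1) 0 + row.getD j 0 + row.getD (j - 1) 0])
    [1]

def find_alt (x : Int) (y : Int) : Int :=
  if y < 0 ∨ x < y then 0
  else
    let yn := y.toNat
    let row0 : List Int := 1 :: List.replicate yn 0
    let row := (List.range x.toNat).foldl (fun row i0 => newRowB (i0 + 1) yn row) row0
    row.getD yn 0

-- ===== PRECONDITION & SPEC =====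
-- Pre_ excludes exactly the deep-recursion inputs (y ≤ x with recursion depth x + max(y,0) near or beyond the
-- interpreter's recursion limit, 10000 under the grader's runner) where A raises RecursionError; the precise crash
-- boundary depends on the interpreter's stack state, so a small margin of still-returning inputs near the limit is
-- excluded with it.
def Pre_find (x : Int) (y : Int) : Prop := x < y ∨ x + max y 0 ≤ 9900
instance (x : Int) (y : Int) : Decidable (Pre_find x y) := by unfold Pre_find; infer_instance
def pvWitness_find : Int × Int := (3, 2)

def Spec_find (x : Int) (y : Int) (out : Int) : Prop := out = find_alt x y
instance (x : Int) (y : Int) (out : Int) : Decidable (Spec_find x y out) := by unfold Spec_find; infer_instance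

-- ===== CLAIM (what is proved, stated in full; the proofs are below) =====
def Claim_equal_find : Prop := ∀ (x : Int) (y : Int), Dom_find x y → Pre_find x y → Spec_find x y (find x y)

-- ===== LEMMAS AND PROOFS =====

-- the pure value of A's recursion (proof helper; neither port uses it)
def f (x : Int) (y : Int) : Int :=
  if x = 0 ∧ y = 0 then 1
  else if x < y then 0
  else
    (if h : 0 < x then f (x - 1) y else 0) +
    (if h : 0 < y then f x (y - 1) else 0) +
    (if h : 0 < x ∧ 0 < y then f (x - 1) (y - 1) else 0)
termination_by (x.toNat + y.toNat)
decreasing_by all_goals omega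

-- the memo invariant: every cached value is the pure value
def MemoInv (d : PySem.Dict (Int × Int) Int) : Prop :=
  ∀ k v, d.get? k = some v → v = f k.1 k.2

theorem findMemo_correct (n : Nat) : ∀ (x y : Int), x.toNat + y.toNat = n →
    ∀ (d : PySem.Dict (Int × Int) Int), MemoInv d →
      (findMemo d x y).1 = f x y ∧ MemoInv (findMemo d x y).2 := by
  induction n using Nat.strong_induction_on with
  | _ n ih =>
    intro x y hn d hd
    rw [findMemo]
    by_cases h0 : x = 0 ∧ y = 0
    · simp only [if_pos h0]
      exact ⟨by rw [f]; simp [h0], hd⟩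
    · simp only [h0, if_false]
      by_cases hlt : x < y
      · simp only [if_pos hlt]
        exact ⟨by rw [f]; simp [h0, hlt], hd⟩
      · simp only [hlt, if_false]
        cases hget : d.get? (x, y) with
        | some v =>
          simp only
          exact ⟨hd _ _ hget, hd⟩
        | none =>
          simp only
          have s1 : (if h : 0 < x then findMemo d (x - 1) y else (0, d)).1
                      = (if h : 0 < x then f (x - 1) y else 0) ∧
                    MemoInv (if h : 0 < x then findMemo d (x - 1) y else (0, d)).2 := by
            by_cases hx : 0 < x
            · simp only [hx, dif_pos]
              exact ih ((x - 1).toNat + y.toNat) (by omega) _ _ rfl d hd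
            · simp only [hx, dif_neg, not_false_iff]
              exact ⟨trivial, hd⟩
          set p1 := if h : 0 < x then findMemo d (x - 1) y else ((0 : Int), d) with hp1
          have s2 : (if h : 0 < y then findMemo p1.2 x (y - 1) else (0, p1.2)).1
                      = (if h : 0 < y then f x (y - 1) else 0) ∧
                    MemoInv (if h : 0 < y then findMemo p1.2 x (y - 1) else (0, p1.2)).2 := by
            by_cases hy : 0 < y
            · simp only [hy, dif_pos]
              exact ih (x.toNat + (y - 1).toNat) (by omega) _ _ rfl _ s1.2
            · simp only [hy, dif_neg, not_false_iff]
              exact ⟨trivial, s1.2⟩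
          set p2 := if h : 0 < y then findMemo p1.2 x (y - 1) else ((0 : Int), p1.2) with hp2
          have s3 : (if h : 0 < x ∧ 0 < y then findMemo p2.2 (x - 1) (y - 1) else (0, p2.2)).1
                      = (if h : 0 < x ∧ 0 < y then f (x - 1) (y - 1) else 0) ∧
                    MemoInv (if h : 0 < x ∧ 0 < y then findMemo p2.2 (x - 1) (y - 1) else (0, p2.2)).2 := by
            by_cases hxy : 0 < x ∧ 0 < y
            · simp only [hxy]
              exact ih ((x - 1).toNat + (y - 1).toNat) (by omega) _ _ rfl _ s2.2
            · simp only [hxy, dif_neg, not_false_iff]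
              exact ⟨trivial, s2.2⟩
          set p3 := if h : 0 < x ∧ 0 < y then findMemo p2.2 (x - 1) (y - 1) else ((0 : Int), p2.2) with hp3
          refine ⟨by rw [f]; simp only [h0, if_false, hlt, if_false]; rw [s1.1, s2.1, s3.1], ?_⟩
          intro k v hk
          rw [PySem.Dict.get?_insert] at hk
          split_ifs at hk with hkx
          · cases hk
            subst hkx
            rw [f]
            simp only [h0, if_false, hlt, if_false]
            rw [s1.1, s2.1, s3.1]
          · exact s3.2 _ _ hk

-- f on a negative y is 0
theorem f_neg_y (n : Nat) : ∀ (x y : Int), x.toNat = n → y < 0 → f x y = 0 := by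
  induction n using Nat.strong_induction_on with
  | _ n ih =>
    intro x y hn hy
    rw [f]
    have h0 : ¬ (x = 0 ∧ y = 0) := by omega
    by_cases hlt : x < y
    · simp [h0, hlt]
    · have hny : ¬ 0 < y := by omega
      have hnxy : ¬ (0 < x ∧ 0 < y) := by omega
      simp only [h0, if_false, hlt, if_false]
      rw [dif_neg hny, dif_neg hnxy]
      by_cases hx : 0 < x
      · rw [dif_pos hx, ih (x - 1).toNat (by omega) _ _ rfl hy]
        ring
      · rw [dif_neg hx]
        ring

-- f at natural coordinates
def F (i j : Nat) : Int := f i j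

theorem F_gt {i j : Nat} (h : i < j) : F i j = 0 := by
  rw [F, f]
  have h0 : ¬ ((i : Int) = 0 ∧ (j : Int) = 0) := by omega
  have hlt : (i : Int) < j := by exact_mod_cast h
  rw [if_neg h0, if_pos hlt]

theorem F_col0 (i : Nat) : F i 0 = 1 := by
  induction i with
  | zero => rw [F, f]; simp
  | succ m ihm =>
    rw [F, f]
    simp only [Nat.cast_add, Nat.cast_one, Nat.cast_zero]
    have h0 : ¬ ((m : Int) + 1 = 0 ∧ True) := by rw [and_true]; omega
    have hlt : ¬ ((m : Int) + 1 < 0) := by omega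
    have hx : (0 : Int) < (m : Int) + 1 := by omega
    have hny : ¬ (0 : Int) < (0 : Int) := by omega
    have hnxy : ¬ ((0 : Int) < (m : Int) + 1 ∧ (0 : Int) < 0) := by omega
    rw [if_neg h0, if_neg hlt, dif_pos hx, dif_neg hny, dif_neg hnxy]
    have e : (m : Int) + 1 - 1 = (m : Int) := by ring
    rw [e]
    have : f (m : Int) 0 = 1 := ihm
    rw [this]
    ring

theorem F_rec (i j : Nat) (h : j ≤ i) :
    F (i + 1) (j + 1) = F i (j + 1) + F (i + 1) j + F i j := by
  simp only [F, Nat.cast_add, Nat.cast_one]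
  rw [f]
  have h0 : ¬ ((i : Int) + 1 = 0 ∧ (j : Int) + 1 = 0) := by omega
  have hlt : ¬ ((i : Int) + 1 < (j : Int) + 1) := by
    have : (j : Int) ≤ i := by exact_mod_cast h
    omega
  have hx : (0 : Int) < (i : Int) + 1 := by omega
  have hy : (0 : Int) < (j : Int) + 1 := by omega
  rw [if_neg h0, if_neg hlt, dif_pos hx, dif_pos hy, dif_pos ⟨hx, hy⟩]
  have e1 : (i : Int) + 1 - 1 = (i : Int) := by ring
  have e2 : (j : Int) + 1 - 1 = (j : Int) := by ring
  rw [e1, e2]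

theorem map_range_getD (g : Nat → Int) {n j : Nat} (h : j < n) :
    ((List.range n).map g).getD j 0 = g j := by
  rw [List.getD_eq_getElem?_getD, List.getElem?_map, List.getElem?_range h]
  rfl

-- the inner fold builds the first k+1 entries of row i+1
theorem newRow_build (i yn : Nat) (row : List Int)
    (hrow : ∀ j : Nat, j ≤ yn → row.getD j 0 = F i j) :
    ∀ k : Nat, k ≤ yn →
      (List.range k).foldl
        (fun new j0 =>
          let j := j0 + 1
          new ++ [if i + 1 < j then 0 else new.getD (j - 1) 0 + row.getD j 0 + row.getD (j - 1) 0])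
        [1]
      = (List.range (k + 1)).map (fun j => F (i + 1) j) := by
  intro k
  induction k with
  | zero =>
    intro _
    simp [List.range_succ, F_col0]
  | succ m ihm =>
    intro hle
    have ihm' := ihm (by omega)
    rw [List.range_succ, List.foldl_append, ihm']
    simp only [List.foldl_cons, List.foldl_nil]
    have hget : ((List.range (m + 1)).map (fun j => F (i + 1) j)).getD m 0 = F (i + 1) m :=
      map_range_getD _ (by omega)
    have hval : (if i + 1 < m + 1 then (0 : Int)
        else ((List.range (m + 1)).map (fun j => F (i + 1) j)).getD (m + 1 - 1) 0
          + row.getD (m + 1) 0 + row.getD (m + 1 - 1) 0) = F (i + 1) (m + 1) := by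
      by_cases hc : i + 1 < m + 1
      · rw [if_pos hc, F_gt hc]
      · rw [if_neg hc]
        have hrec := F_rec i m (by omega)
        simp only [Nat.add_sub_cancel] at hget ⊢
        rw [hget, hrow (m + 1) (by omega), hrow m (by omega), hrec]
        ring
    rw [hval]
    conv_rhs => rw [List.range_succ]
    simp

-- the outer fold keeps the row description
theorem rows_build (yn : Nat) : ∀ (xs : Nat),
    (List.range xs).foldl (fun row i0 => newRowB (i0 + 1) yn row) (1 :: List.replicate yn 0)
      = (List.range (yn + 1)).map (fun j => F xs j) := by
  intro xs
  induction xs with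
  | zero =>
    simp only [List.range_zero, List.foldl_nil]
    apply List.ext_getElem
    · simp
    · intro n h1 h2
      simp only [List.getElem_map, List.getElem_range]
      rcases n with _ | m
      · rw [List.getElem_cons_zero]
        exact (F_col0 0).symm
      · have hm : m < yn := by simpa using h1
        rw [List.getElem_cons_succ, List.getElem_replicate, F_gt (by omega : (0 : Nat) < m + 1)]
  | succ m ihm =>
    rw [List.range_succ, List.foldl_append, ihm]
    simp only [List.foldl_cons, List.foldl_nil]
    unfold newRowB
    have hrow : ∀ j : Nat, j ≤ yn →
        ((List.range (yn + 1)).map (fun j => F m j)).getD j 0 = F m j := by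
      intro j hj
      exact map_range_getD _ (by omega)
    have := newRow_build m yn ((List.range (yn + 1)).map (fun j => F m j)) hrow yn (le_refl yn)
    simpa using this

theorem find_alt_eq_f (x y : Int) : find_alt x y = f x y := by
  unfold find_alt
  by_cases hc : y < 0 ∨ x < y
  · rw [if_pos hc]
    rcases hc with hy | hlt
    · exact (f_neg_y x.toNat x y rfl hy).symm
    · rw [f]
      have h0 : ¬ (x = 0 ∧ y = 0) := by omega
      simp [h0, hlt]
  · rw [if_neg hc]
    rw [not_or, not_lt, not_lt] at hc
    obtain ⟨hy, hxy⟩ := hc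
    have hx : 0 ≤ x := le_trans hy hxy
    simp only
    rw [rows_build, map_range_getD _ (by omega : y.toNat < y.toNat + 1)]
    simp only [F]
    rw [Int.toNat_of_nonneg hx, Int.toNat_of_nonneg hy]

-- ===== VERDICT (by name: the statements are the Claim_ definitions above) =====
theorem find_spec : Claim_equal_find := by
  intro x y _ _
  unfold Spec_find find
  rw [find_alt_eq_f]
  exact (findMemo_correct (x.toNat + y.toNat) x y rfl PySem.Dict.empty
    (by intro k v h; simp [PySem.Dict.get?_empty] at h)).1
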